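-- pv_equiv track=rewrite | github.com/praxagent/prax | prax/plugins/tools/news/plugin.py | _summarize_briefing
-- ===== SOURCE A (Python) =====
-- def _summarize_briefing(content: str) -> str:
--     """Extract a compact digest from the full briefing for the agent.
--
--     Returns source names + top ~3 headlines each so the agent can curate
--     a conversational summary without dumping the entire briefing.
--     """
--     lines = []
--     current_source = None
--     count = 0
--     for line in content.splitlines():
--         if line.startswith("### "):
--             current_source = line
--             count = 0
--             lines.append(current_source)
--         elif line and line[0].isdigit() and ". **" in line:
--             count += 1
--             if count <= 3:
--                 # Strip link markdown to keep it compact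
--                 lines.append(line)
--             elif count == 4:
--                 lines.append("  _(+ more — see full briefing)_")
--     return "\n".join(lines)
-- ===== SOURCE B (Python) =====
-- def _summarize_briefing(content: str) -> str:
--     """Segment-based rewrite: group lines into (header, headlines) segments
--     in one scan, then emit each segment's header, top-3 headlines and an
--     overflow marker in a second pass."""
--     def _is_headline(line):
--         return bool(line) and line[0].isdigit() and ". **" in line
--
--     segments = [(None, [])]
--     for line in content.splitlines():
--         if line.startswith("### "):
--             segments.append((line, []))
--         elif _is_headline(line):
--             segments[-1][1].append(line)
--
--     out = []
--     for header, heads in segments: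
--         if header is not None:
--             out.append(header)
--         out.extend(heads[:3])
--         if len(heads) >= 4:
--             out.append("  _(+ more — see full briefing)_")
--     return "\n".join(out)
-- ===== Notes on version B (the rewrite author's own statement) =====
-- stated objective: alternative
-- what changed: Replaces A's single loop with inline per-source count tracking by a two-pass decomposition: one scan groups lines into (header, headlines) segments, a second pass emits each header, its first three headlines and the overflow marker for segments with four or more.
import Mathlib
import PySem

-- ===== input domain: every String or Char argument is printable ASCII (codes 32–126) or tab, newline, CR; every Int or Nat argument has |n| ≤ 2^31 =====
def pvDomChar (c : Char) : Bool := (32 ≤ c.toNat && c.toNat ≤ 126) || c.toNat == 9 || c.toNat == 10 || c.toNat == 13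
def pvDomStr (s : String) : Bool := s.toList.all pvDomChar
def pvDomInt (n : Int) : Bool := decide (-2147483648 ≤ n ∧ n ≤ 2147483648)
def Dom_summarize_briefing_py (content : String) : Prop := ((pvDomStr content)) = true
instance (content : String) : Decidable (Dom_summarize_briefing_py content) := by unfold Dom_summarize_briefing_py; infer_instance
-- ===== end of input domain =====

-- B replaces A's inline count tracking by an explicit segment-grouping pass followed by an emission pass (objective: alternative decomposition, same cost).

-- ===== PORT A =====
def pvMore : String := "  _(+ more — see full briefing)_"

-- 'line and line[0].isdigit() and ". **" in line'
def pvIsHeadline (line : String) : Bool :=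
  match line.toList with
  | [] => false
  | c :: _ => PySem.Chars.isdigit c && PySem.Str.isIn ". **" line

-- one iteration of A's loop over (lines, count); A's 'current_source' is only ever
-- appended immediately, so it carries no state across iterations and is not kept.
def pvStepA (st : List String × Int) (line : String) : List String × Int :=
  if PySem.Str.startswith line "### " then (st.1 ++ [line], 0)
  else if pvIsHeadline line then
    if st.2 + 1 ≤ 3 then (st.1 ++ [line], st.2 + 1)
    else if st.2 + 1 == 4 then (st.1 ++ [pvMore], st.2 + 1)
    else (st.1, st.2 + 1)
  else st

def summarize_briefing_py (content : String) : String :=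
  PySem.Str.join "\n" ((PySem.Str.splitlines content).foldl pvStepA ([], 0)).1

-- ===== PORT B =====
-- Source B's segments list, kept as (current header, current headlines, finished segments);
-- appending to segments[-1] is appending to the current segment.
def pvStepB (st : Option String × List String × List (Option String × List String))
    (line : String) : Option String × List String × List (Option String × List String) :=
  if PySem.Str.startswith line "### " then (some line, [], st.2.2 ++ [(st.1, st.2.1)])
  else if pvIsHeadline line then (st.1, st.2.1 ++ [line], st.2.2)
  else st

-- the emission pass for one segment: optional header, heads[:3], overflow marker
def pvEmitSeg : Option String × List String → List String
  | (h, hs) => h.toList ++ hs.take 3 ++ (if 4 ≤ hs.length then [pvMore] else [])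

def summarize_briefing_py_alt (content : String) : String :=
  let st := (PySem.Str.splitlines content).foldl pvStepB (none, [], [])
  PySem.Str.join "\n" ((st.2.2 ++ [(st.1, st.2.1)]).flatMap pvEmitSeg)

-- ===== PRECONDITION & SPEC =====
def Spec_summarize_briefing_py (content : String) (out : String) : Prop := out = summarize_briefing_py_alt content
instance (content : String) (out : String) : Decidable (Spec_summarize_briefing_py content out) := by unfold Spec_summarize_briefing_py; infer_instance

-- ===== CLAIM (what is proved, stated in full; the proofs are below) =====
def Claim_equal_summarize_briefing_py : Prop := ∀ (content : String), Dom_summarize_briefing_py content → Spec_summarize_briefing_py content (summarize_briefing_py content)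

-- ===== LEMMAS AND PROOFS =====

-- Appending one more headline to a segment changes its emission by exactly what A's
-- loop appends at that count: the line itself (count ≤ 3), the marker (count = 4), nothing after.
theorem pvEmit_snoc (hdr : Option String) (heads : List String) (l : String) :
    pvEmitSeg (hdr, heads ++ [l])
      = pvEmitSeg (hdr, heads)
          ++ (if heads.length < 3 then [l] else if heads.length = 3 then [pvMore] else []) := by
  rcases Nat.lt_trichotomy heads.length 3 with h | h | h
  · have t1 : heads.take 3 = heads := List.take_of_length_le h.le
    have t2 : (heads ++ [l]).take 3 = heads ++ [l] := List.take_of_length_le (by simp; omega)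
    have m1 : ¬ 4 ≤ heads.length + 1 := by omega
    have m2 : ¬ 4 ≤ heads.length := by omega
    simp [pvEmitSeg, t1, t2, h, m1, m2]
  · have t1 : heads.take 3 = heads := List.take_of_length_le h.le
    simp [pvEmitSeg, t1, h]
  · have t : 3 - heads.length = 0 := by omega
    have m1 : 4 ≤ heads.length + 1 := by omega
    have m2 : 4 ≤ heads.length := by omega
    simp [pvEmitSeg, List.take_append, t, m1, m2,
      show ¬ heads.length < 3 by omega, show heads.length ≠ 3 by omega]

-- Loop invariant: A's (lines, count) is the emission of B's (done segments + current
-- partial segment), with count = the current segment's headline count.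
theorem pv_inv (ls : List String) :
    ∀ (done : List (Option String × List String)) (hdr : Option String) (heads : List String),
    ls.foldl pvStepA (done.flatMap pvEmitSeg ++ pvEmitSeg (hdr, heads), (heads.length : Int))
    = (((ls.foldl pvStepB (hdr, heads, done)).2.2
          ++ [((ls.foldl pvStepB (hdr, heads, done)).1, (ls.foldl pvStepB (hdr, heads, done)).2.1)]).flatMap pvEmitSeg,
       (((ls.foldl pvStepB (hdr, heads, done)).2.1).length : Int)) := by
  induction ls with
  | nil => intro done hdr heads; simp [List.flatMap_append]
  | cons l ls ih =>
    intro done hdr heads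
    simp only [List.foldl_cons]
    by_cases hs : PySem.Str.startswith l "### "
    · have hA : pvStepA (done.flatMap pvEmitSeg ++ pvEmitSeg (hdr, heads), (heads.length : Int)) l
          = ((done ++ [(hdr, heads)]).flatMap pvEmitSeg ++ pvEmitSeg (some l, []),
             ((List.length ([] : List String)) : Int)) := by
        unfold pvStepA
        rw [if_pos hs]
        simp [pvEmitSeg, List.flatMap_append]
      have hB : pvStepB (hdr, heads, done) l = (some l, [], done ++ [(hdr, heads)]) := by
        unfold pvStepB; rw [if_pos hs]
      rw [hA, hB]; exact ih (done ++ [(hdr, heads)]) (some l) []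
    · by_cases hh : pvIsHeadline l
      · have hB : pvStepB (hdr, heads, done) l = (hdr, heads ++ [l], done) := by
          unfold pvStepB; rw [if_neg hs, if_pos hh]
        have hA : pvStepA (done.flatMap pvEmitSeg ++ pvEmitSeg (hdr, heads), (heads.length : Int)) l
            = (done.flatMap pvEmitSeg ++ pvEmitSeg (hdr, heads ++ [l]), ((heads ++ [l]).length : Int)) := by
          unfold pvStepA
          rw [if_neg hs, if_pos hh, pvEmit_snoc]
          by_cases h1 : heads.length < 3
          · rw [if_pos (show ((heads.length : Int) + 1 ≤ 3) by omega), if_pos h1]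
            simp
          · by_cases h2 : heads.length = 3
            · rw [if_neg (show ¬ ((heads.length : Int) + 1 ≤ 3) by omega),
                  if_pos (show (((heads.length : Int) + 1 == 4) = true) by simp [h2]),
                  if_neg h1, if_pos h2]
              simp
            · rw [if_neg (show ¬ ((heads.length : Int) + 1 ≤ 3) by omega),
                  if_neg (show ¬ (((heads.length : Int) + 1 == 4) = true) by simp; omega),
                  if_neg h1, if_neg h2]
              simp
        rw [hA, hB]; exact ih done hdr (heads ++ [l])
      · have hB : pvStepB (hdr, heads, done) l = (hdr, heads, done) := by
          unfold pvStepB; rw [if_neg hs, if_neg hh]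
        have hA : pvStepA (done.flatMap pvEmitSeg ++ pvEmitSeg (hdr, heads), (heads.length : Int)) l
            = (done.flatMap pvEmitSeg ++ pvEmitSeg (hdr, heads), (heads.length : Int)) := by
          unfold pvStepA; rw [if_neg hs, if_neg hh]
        rw [hA, hB]; exact ih done hdr heads

-- ===== VERDICT (by name: the statement is the Claim_ definition above) =====
theorem summarize_briefing_py_spec : Claim_equal_summarize_briefing_py := by
  intro content _
  unfold Spec_summarize_briefing_py summarize_briefing_py summarize_briefing_py_alt
  have h := pv_inv (PySem.Str.splitlines content) [] none []
  have h0 : pvEmitSeg (none, ([] : List String)) = [] := by simp [pvEmitSeg]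
  rw [h0] at h
  simp only [List.flatMap_nil, List.nil_append, List.length_nil, Nat.cast_zero] at h
  simp only [h]
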